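-- pv_equiv track=rewrite | github.com/tribalfs/androidx | development/build_log_simplifier/build_log_simplifier.py | collapse_tasks_having_no_output
-- ===== SOURCE A (Python) =====
-- def collapse_tasks_having_no_output(lines):
--     result = []
--     # When we see a task name, we might not emit it if it doesn't have any output
--     # This variable is that pending task name, or none if we have no pending task
--     pending_task = None
--     pending_blanks = []
--     for line in lines:
--         is_task = line.startswith("> Task ")
--         if is_task:
--             pending_task = line
--             pending_blanks = []
--         elif line.strip() == "":
--             # If we have a pending task and we found a blank line, then hold the blank line,
--             # and only output it if we later find some nonempty output
--             if pending_task is not None: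
--                 pending_blanks.append(line)
--             else:
--                 result.append(line)
--         else:
--             # We found some nonempty output, now we emit any pending task names
--             if pending_task is not None:
--                 result.append(pending_task)
--                 result += pending_blanks
--                 pending_task = None
--                 pending_blanks = []
--             result.append(line)
--     return result
-- ===== SOURCE B (Python) =====
-- def collapse_tasks_having_no_output(lines):
--     # Group-based rewrite: partition lines into a headerless initial group and
--     # task-headed groups, then emit each task group only if its body has output.
--     groups = []
--     current = []
--     for line in lines:
--         if line.startswith("> Task "):
--             groups.append(current)
--             current = [line]
--         else:
--             current.append(line)
--     groups.append(current)
--     result = list(groups[0])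
--     for g in groups[1:]:
--         if any(l.strip() != "" for l in g[1:]):
--             result += g
--     return result
-- ===== Notes on version B (the rewrite author's own statement) =====
-- stated objective: alternative
-- what changed: Replaces the streaming pending-task/pending-blanks accumulator with a two-pass decomposition: first partition the lines into header-delimited groups, then emit the initial group verbatim and each task-headed group only if its body contains a non-blank line.
import Mathlib
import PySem

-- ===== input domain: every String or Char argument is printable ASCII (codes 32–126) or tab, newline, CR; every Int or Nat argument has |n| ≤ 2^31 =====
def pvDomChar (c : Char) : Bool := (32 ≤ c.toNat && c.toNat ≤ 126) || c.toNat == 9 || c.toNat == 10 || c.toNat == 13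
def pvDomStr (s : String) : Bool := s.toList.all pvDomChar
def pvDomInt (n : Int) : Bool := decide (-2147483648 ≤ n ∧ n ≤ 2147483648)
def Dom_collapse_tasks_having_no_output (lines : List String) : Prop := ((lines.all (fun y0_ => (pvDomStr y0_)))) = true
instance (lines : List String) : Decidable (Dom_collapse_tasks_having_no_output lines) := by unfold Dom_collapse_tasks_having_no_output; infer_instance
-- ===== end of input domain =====

-- B replaces A's streaming pending-task accumulator with an explicit split into
-- header-delimited groups followed by a keep-groups-with-output emit pass (alternative decomposition, same cost).

-- ===== PORT A =====
-- A: one fold over state (result, pending_task, pending_blanks), as in the Python loop.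
def pvStepA (st : List String × Option String × List String) (line : String) :
    List String × Option String × List String :=
  let result := st.1
  let pending_task := st.2.1
  let pending_blanks := st.2.2
  if PySem.Str.startswith line "> Task " then
    (result, some line, [])
  else if PySem.Str.strip line = "" then
    match pending_task with
    | some _ => (result, pending_task, pending_blanks ++ [line])
    | none => (result ++ [line], pending_task, pending_blanks)
  else
    match pending_task with
    | some t => (result ++ [t] ++ pending_blanks ++ [line], none, [])
    | none => (result ++ [line], pending_task, pending_blanks)

def collapse_tasks_having_no_output (lines : List String) : List String :=
  (lines.foldl pvStepA ([], none, [])).1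

-- ===== PORT B =====
-- B: pass 1 partitions lines into groups (new group at each "> Task " header);
-- pass 2 emits the initial group and every task group whose body has a non-blank line.
def pvStepB (st : List (List String) × List String) (line : String) :
    List (List String) × List String :=
  if PySem.Str.startswith line "> Task " then (st.1 ++ [st.2], [line])
  else (st.1, st.2 ++ [line])

def pvEmitStep (result : List String) (g : List String) : List String :=
  if (g.drop 1).any (fun l => decide (PySem.Str.strip l ≠ "")) then result ++ g else result

def collapse_tasks_having_no_output_alt (lines : List String) : List String :=
  let st := lines.foldl pvStepB ([], [])
  let groups := st.1 ++ [st.2]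
  (groups.drop 1).foldl pvEmitStep (groups.headD [])

-- ===== PRECONDITION & SPEC =====
def Spec_collapse_tasks_having_no_output (lines : List String) (out : List String) : Prop := out = collapse_tasks_having_no_output_alt lines
instance (lines : List String) (out : List String) : Decidable (Spec_collapse_tasks_having_no_output lines out) := by unfold Spec_collapse_tasks_having_no_output; infer_instance

-- ===== CLAIM (what is proved, stated in full; the proofs are below) =====
def Claim_equal_collapse_tasks_having_no_output : Prop := ∀ (lines : List String), Dom_collapse_tasks_having_no_output lines → Spec_collapse_tasks_having_no_output lines (collapse_tasks_having_no_output lines)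

-- ===== LEMMAS AND PROOFS =====

-- abbreviations for the two tests
def pvHdr (l : String) : Bool := PySem.Str.startswith l "> Task "
def pvBlank (l : String) : Bool := decide (PySem.Str.strip l = "")

-- model of A's remaining output given the pending state
def pvModel : List String → Option (String × List String) → List String
  | [], _ => []
  | l :: ls, p =>
    if pvHdr l then pvModel ls (some (l, []))
    else if pvBlank l then
      match p with
      | some (t, bs) => pvModel ls (some (t, bs ++ [l]))
      | none => l :: pvModel ls none
    else
      match p with
      | some (t, bs) => t :: bs ++ l :: pvModel ls none
      | none => l :: pvModel ls none

-- lines before the first header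
def pvFront : List String → List String
  | [] => []
  | l :: ls => if pvHdr l then [] else l :: pvFront ls

-- the task-headed groups
def pvTGroups (cur : List String) : List String → List (List String)
  | [] => [cur]
  | l :: ls => if pvHdr l then cur :: pvTGroups [l] ls else pvTGroups (cur ++ [l]) ls

def pvTgs : List String → List (List String)
  | [] => []
  | l :: ls => if pvHdr l then pvTGroups [l] ls else pvTgs ls

def pvKeep (g : List String) : Bool := (g.drop 1).any (fun l => !pvBlank l)

def pvEmit (gs : List (List String)) : List String :=
  gs.foldr (fun g acc => if pvKeep g then g ++ acc else acc) []

theorem pvTGroups_eq (ls : List String) : ∀ cur, pvTGroups cur ls = (cur ++ pvFront ls) :: pvTgs ls := by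
  induction ls with
  | nil => intro cur; simp [pvTGroups, pvFront, pvTgs]
  | cons l ls ih =>
    intro cur
    by_cases h : pvHdr l = true
    · simp [pvTGroups, pvFront, pvTgs, h, ih [l]]
    · simp [pvTGroups, pvFront, pvTgs, h, ih (cur ++ [l])]

-- A's fold from any state: result so far ++ the model's remainder
theorem pvFoldA (ls : List String) : ∀ (res : List String) (pt : Option String) (pb : List String),
    (ls.foldl pvStepA (res, pt, pb)).1 = res ++ pvModel ls (pt.map (fun t => (t, pb))) := by
  induction ls with
  | nil => intro res pt pb; simp [pvModel]
  | cons l ls ih =>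
    intro res pt pb
    rw [List.foldl_cons]
    by_cases h : pvHdr l = true
    · have h' := h; simp [pvHdr] at h'
      have hstep : pvStepA (res, pt, pb) l = (res, some l, []) := by simp [pvStepA, h']
      rw [hstep, ih]
      simp [pvModel, h]
    · have h' := h; simp [pvHdr] at h'
      by_cases hb : pvBlank l = true
      · have hb' : PySem.Str.strip l = "" := by simpa [pvBlank] using hb
        cases pt with
        | none =>
          have hstep : pvStepA (res, none, pb) l = (res ++ [l], none, pb) := by
            simp [pvStepA, h', hb']
          rw [hstep, ih]
          simp [pvModel, h, hb]
        | some t =>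
          have hstep : pvStepA (res, some t, pb) l = (res, some t, pb ++ [l]) := by
            simp [pvStepA, h', hb']
          rw [hstep, ih]
          simp [pvModel, h, hb]
      · have hb' : ¬ PySem.Str.strip l = "" := by simpa [pvBlank] using hb
        cases pt with
        | none =>
          have hstep : pvStepA (res, none, pb) l = (res ++ [l], none, pb) := by
            simp [pvStepA, h', hb']
          rw [hstep, ih]
          simp [pvModel, h, hb]
        | some t =>
          have hstep : pvStepA (res, some t, pb) l = (res ++ [t] ++ pb ++ [l], none, []) := by
            simp [pvStepA, h', hb']
          rw [hstep, ih]
          simp [pvModel, h, hb]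

theorem pvKeep_all_blank (t : String) (bs : List String) (hbs : ∀ b ∈ bs, pvBlank b = true) :
    pvKeep (t :: bs) = false := by
  simp only [pvKeep, List.drop_one, List.tail_cons, List.any_eq_false]
  intro b hb
  simp [hbs b hb]

-- simultaneous characterisation of the model by groups
theorem pvModel_eq (ls : List String) :
    (pvModel ls none = pvFront ls ++ pvEmit (pvTgs ls)) ∧
    (∀ t bs, (∀ b ∈ bs, pvBlank b = true) →
      pvModel ls (some (t, bs)) = pvEmit ((t :: (bs ++ pvFront ls)) :: pvTgs ls)) := by
  induction ls with
  | nil =>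
    constructor
    · simp [pvModel, pvFront, pvTgs, pvEmit]
    · intro t bs hbs
      simp [pvModel, pvFront, pvTgs, pvEmit, pvKeep_all_blank t bs hbs]
  | cons l ls ih =>
    obtain ⟨ihN, ihS⟩ := ih
    by_cases h : pvHdr l = true
    · constructor
      · simp [pvModel, pvFront, pvTgs, h, pvTGroups_eq, ihS l [] (by simp)]
      · intro t bs hbs
        rw [show pvModel (l :: ls) (some (t, bs)) = pvModel ls (some (l, [])) by simp [pvModel, h]]
        rw [ihS l [] (by simp)]
        have hf : pvFront (l :: ls) = [] := by simp [pvFront, h]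
        have ht : pvTgs (l :: ls) = (l :: pvFront ls) :: pvTgs ls := by
          simp [pvTgs, h, pvTGroups_eq]
        rw [hf, ht]
        simp [pvEmit, pvKeep_all_blank t bs (by simpa using hbs)]
    · by_cases hb : pvBlank l = true
      · constructor
        · simp [pvModel, h, hb, pvFront, pvTgs, ihN]
        · intro t bs hbs
          have hall : ∀ b ∈ bs ++ [l], pvBlank b = true := by
            intro b hbm; rcases List.mem_append.mp hbm with hx | hx
            · exact hbs b hx
            · simp at hx; subst hx; exact hb
          rw [show pvModel (l :: ls) (some (t, bs)) = pvModel ls (some (t, bs ++ [l])) by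
            simp [pvModel, h, hb]]
          rw [ihS t (bs ++ [l]) hall]
          have hf : pvFront (l :: ls) = l :: pvFront ls := by simp [pvFront, h]
          have ht : pvTgs (l :: ls) = pvTgs ls := by simp [pvTgs, h]
          rw [hf, ht]
          simp
      · constructor
        · simp [pvModel, h, hb, pvFront, pvTgs, ihN]
        · intro t bs hbs
          have hkeep : pvKeep (t :: (bs ++ (l :: pvFront ls))) = true := by
            simp only [pvKeep, List.drop_one, List.tail_cons, List.any_eq_true]
            exact ⟨l, by simp, by simp [hb]⟩
          rw [show pvModel (l :: ls) (some (t, bs)) = t :: bs ++ l :: pvModel ls none by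
            simp [pvModel, h, hb]]
          rw [ihN]
          have hf : pvFront (l :: ls) = l :: pvFront ls := by simp [pvFront, h]
          have ht : pvTgs (l :: ls) = pvTgs ls := by simp [pvTgs, h]
          rw [hf, ht]
          simp [pvEmit, hkeep]

-- B's group-splitting fold equals pvTGroups
theorem pvFoldB1 (ls : List String) : ∀ (gs : List (List String)) (cur : List String),
    (ls.foldl pvStepB (gs, cur)).1 ++ [(ls.foldl pvStepB (gs, cur)).2] = gs ++ pvTGroups cur ls := by
  induction ls with
  | nil => intro gs cur; simp [pvTGroups]
  | cons l ls ih =>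
    intro gs cur
    rw [List.foldl_cons]
    by_cases h : pvHdr l = true
    · have h' := h; simp [pvHdr] at h'
      have hstep : pvStepB (gs, cur) l = (gs ++ [cur], [l]) := by simp [pvStepB, h']
      rw [hstep, ih]
      simp [pvTGroups, h]
    · have h' := h; simp [pvHdr] at h'
      have hstep : pvStepB (gs, cur) l = (gs, cur ++ [l]) := by simp [pvStepB, h']
      rw [hstep, ih]
      simp [pvTGroups, h]

-- B's emit fold equals g0 ++ pvEmit gs
theorem pvFoldB2 (gs : List (List String)) : ∀ (g0 : List String),
    gs.foldl pvEmitStep g0 = g0 ++ pvEmit gs := by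
  induction gs with
  | nil => intro g0; simp [pvEmit]
  | cons g gs ih =>
    intro g0
    have he : pvEmitStep g0 g = if pvKeep g then g0 ++ g else g0 := by
      simp [pvEmitStep, pvKeep, pvBlank]
    by_cases hk : pvKeep g = true
    · rw [List.foldl_cons, he, if_pos hk, ih]
      simp [pvEmit, hk]
    · simp only [Bool.not_eq_true] at hk
      rw [List.foldl_cons, he, hk]
      simp only [Bool.false_eq_true, if_false, ih]
      simp [pvEmit, hk]

theorem pvAltEq (lines : List String) :
    collapse_tasks_having_no_output_alt lines = pvFront lines ++ pvEmit (pvTgs lines) := by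
  unfold collapse_tasks_having_no_output_alt
  have h1 := pvFoldB1 lines [] []
  rw [pvTGroups_eq] at h1
  simp only [List.nil_append] at h1
  simp only []
  rw [h1]
  simp only [List.drop_one, List.tail_cons, List.headD_cons]
  exact pvFoldB2 (pvTgs lines) (pvFront lines)

-- ===== VERDICT (by name: the statement is the Claim_ definition above) =====
theorem collapse_tasks_having_no_output_spec : Claim_equal_collapse_tasks_having_no_output := by
  intro lines _
  unfold Spec_collapse_tasks_having_no_output collapse_tasks_having_no_output
  rw [pvFoldA lines [] none []]
  simp only [Option.map_none, List.nil_append]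
  rw [(pvModel_eq lines).1, pvAltEq]
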